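-- pv_equiv track=rewrite | github.com/carnival77/Algorithm_Practice | Codility/Test_250923/2/2.py | solution
-- ===== SOURCE A (Python) =====
-- def solution(grid):
--     n=len(grid)
--     m=len(grid[0])
--
--     ans=0
--
--     for x in range((n+1)//2):
--         for y in range((m+1)//2):
--             points=set()
--             points.add((x,y))
--             points.add((x,m-1-y))
--             points.add((n-1-x,y))
--             points.add((n-1-x,m-1-y))
--             B_cnt,W_cnt=0,0
--             for i,j in points:
--                 if grid[i][j]=='B':B_cnt+=1
--                 if grid[i][j]=='W':W_cnt+=1
--             ans+=min(B_cnt,W_cnt)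
--     return ans
-- ===== SOURCE B (Python) =====
-- def solution(grid):
--     n = len(grid)
--     m = len(grid[0])
--     counts = {}
--     for i in range(n):
--         for j in range(m):
--             a = i if i <= n - 1 - i else n - 1 - i
--             b = j if j <= m - 1 - j else m - 1 - j
--             B, W = counts.get((a, b), (0, 0))
--             c = grid[i][j]
--             counts[(a, b)] = (B + (c == 'B'), W + (c == 'W'))
--     return sum(min(B, W) for B, W in counts.values())
-- ===== Notes on version B (the rewrite author's own statement) =====
-- stated objective: alternative
-- what changed: Instead of probing the four symmetric quadrant cells per representative with a temporary set, B makes one flat pass over every cell of the grid, bucketing B/W counts per canonical class key (min(i,n-1-i), min(j,m-1-j)) in a dict, then sums min(B,W) over the buckets.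
import Mathlib
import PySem

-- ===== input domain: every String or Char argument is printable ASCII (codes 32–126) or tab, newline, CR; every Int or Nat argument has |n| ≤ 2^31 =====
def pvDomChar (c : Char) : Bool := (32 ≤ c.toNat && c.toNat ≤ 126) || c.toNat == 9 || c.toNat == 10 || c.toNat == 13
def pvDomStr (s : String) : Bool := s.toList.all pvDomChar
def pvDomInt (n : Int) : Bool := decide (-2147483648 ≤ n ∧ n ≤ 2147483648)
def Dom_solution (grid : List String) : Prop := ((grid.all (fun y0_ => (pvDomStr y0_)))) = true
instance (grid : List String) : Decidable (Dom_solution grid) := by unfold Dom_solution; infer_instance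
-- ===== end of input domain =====

-- B replaces A's per-representative probing of the four symmetric cells (via a temporary set)
-- by one flat pass over all cells that buckets B/W counts per canonical class key in a dict;
-- objective: alternative (a different decomposition of the same O(n*m) work).

-- ===== PORT A =====
-- shared indexing helper: grid[i][j] as a Char (exact under Pre_, where every access is in range)
def pvCharAt (grid : List String) (i j : Int) : Char :=
  PySem.List.pyGetD (PySem.List.pyGetD grid i "").toList j ' '

def solution (grid : List String) : Int :=
  let n : Int := PySem.List.len grid
  let m : Int := PySem.Str.len (PySem.List.pyGetD grid 0 "")
  (PySem.List.pyRange 0 (PySem.Int.floordiv (n + 1) 2) 1).foldl (fun ans x =>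
    (PySem.List.pyRange 0 (PySem.Int.floordiv (m + 1) 2) 1).foldl (fun ans y =>
      let points : PySem.Set (Int × Int) :=
        PySem.Set.add (PySem.Set.add (PySem.Set.add (PySem.Set.add PySem.Set.empty
          (x, y)) (x, m - 1 - y)) (n - 1 - x, y)) (n - 1 - x, m - 1 - y)
      let cnts : Int × Int := points.foldl (fun bw p =>
        let bw1 := if pvCharAt grid p.1 p.2 = 'B' then (bw.1 + 1, bw.2) else bw
        if pvCharAt grid p.1 p.2 = 'W' then (bw1.1, bw1.2 + 1) else bw1) (0, 0)
      ans + min cnts.1 cnts.2) ans) 0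

-- ===== PORT B =====
def solution_alt (grid : List String) : Int :=
  let n : Int := PySem.List.len grid
  let m : Int := PySem.Str.len (PySem.List.pyGetD grid 0 "")
  let counts : PySem.Dict (Int × Int) (Int × Int) :=
    (PySem.List.pyRange 0 n 1).foldl (fun d i =>
      (PySem.List.pyRange 0 m 1).foldl (fun d j =>
        let a := if i ≤ n - 1 - i then i else n - 1 - i
        let b := if j ≤ m - 1 - j then j else m - 1 - j
        let BW := d.getD (a, b) (0, 0)
        let c := pvCharAt grid i j
        d.insert (a, b) (BW.1 + (if c = 'B' then 1 else 0), BW.2 + (if c = 'W' then 1 else 0))) d)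
      PySem.Dict.empty
  (counts.values.map (fun bw => min bw.1 bw.2)).sum

-- ===== PRECONDITION & SPEC =====
-- Pre_ excludes exactly the inputs where A raises (IndexError): the empty grid, and grids
-- with at least one column whose some row is shorter than the first row.
def Pre_solution (grid : List String) : Prop :=
  grid ≠ [] ∧ ∀ s ∈ grid, (grid.headI).toList.length ≤ s.toList.length
instance (grid : List String) : Decidable (Pre_solution grid) := by unfold Pre_solution; infer_instance
def pvWitness_solution : List String := ["BW", "WB"]

def Spec_solution (grid : List String) (out : Int) : Prop := out = solution_alt grid
instance (grid : List String) (out : Int) : Decidable (Spec_solution grid out) := by unfold Spec_solution; infer_instance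

-- ===== CLAIM (what is proved, stated in full; the proofs are below) =====
def Claim_equal_solution : Prop := ∀ (grid : List String), Dom_solution grid → Pre_solution grid → Spec_solution grid (solution grid)

-- ===== LEMMAS AND PROOFS =====

-- proof-only abbreviations
def pvKey (n m : Int) (p : Int × Int) : Int × Int :=
  ((if p.1 ≤ n - 1 - p.1 then p.1 else n - 1 - p.1),
   (if p.2 ≤ m - 1 - p.2 then p.2 else m - 1 - p.2))

abbrev pvL (n m : Int) : List (Int × Int) :=
  (PySem.List.pyRange 0 n 1) ×ˢ (PySem.List.pyRange 0 m 1)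

def pvCnt (grid : List String) (n m : Int) (k : Int × Int) (c : Char) : Int :=
  ((pvL n m).countP (fun p => pvKey n m p == k && (pvCharAt grid p.1 p.2 == c)) : Int)

def pvF (grid : List String) (n m : Int) (k : Int × Int) : Int :=
  min (pvCnt grid n m k 'B') (pvCnt grid n m k 'W')

def pvN (grid : List String) : Int := PySem.List.len grid
def pvM (grid : List String) : Int := PySem.Str.len (PySem.List.pyGetD grid 0 "")

-- nested loop over two ranges = loop over the product list
theorem pv_foldl_product {γ : Type} (l1 l2 : List Int) (f : γ → Int × Int → γ) (d : γ) :
    l1.foldl (fun d i => l2.foldl (fun d j => f d (i, j)) d) d = (l1 ×ˢ l2).foldl f d := by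
  induction l1 generalizing d with
  | nil => rfl
  | cons a l1 ih =>
    simp [List.product_cons, List.foldl_append, List.foldl_map, ih]

theorem pv_sum_product (l1 l2 : List Int) (g : Int × Int → Int) :
    ((l1 ×ˢ l2).map g).sum = (l1.map (fun x => (l2.map (fun y => g (x, y))).sum)).sum := by
  induction l1 with
  | nil => rfl
  | cons a l1 ih =>
    simp [List.product_cons, List.map_append, List.sum_append, ih, List.map_map, Function.comp_def]

-- B's dict fold: the bucket of key k holds the pair of class counts
theorem pv_getD_fold (grid : List String) (n m : Int) (l : List (Int × Int)) :
    ∀ (d : PySem.Dict (Int × Int) (Int × Int)) (k : Int × Int),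
    (l.foldl (fun d p => d.insert (pvKey n m p)
        ((d.getD (pvKey n m p) (0, 0)).1 + (if pvCharAt grid p.1 p.2 = 'B' then 1 else 0),
         (d.getD (pvKey n m p) (0, 0)).2 + (if pvCharAt grid p.1 p.2 = 'W' then 1 else 0))) d).getD k (0, 0)
      = ((d.getD k (0, 0)).1 + (l.countP (fun p => pvKey n m p == k && (pvCharAt grid p.1 p.2 == 'B')) : Int),
         (d.getD k (0, 0)).2 + (l.countP (fun p => pvKey n m p == k && (pvCharAt grid p.1 p.2 == 'W')) : Int)) := by
  induction l with
  | nil => intro d k; simp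
  | cons p l ih =>
    intro d k
    rw [List.foldl_cons, ih, List.countP_cons, List.countP_cons]
    by_cases hk : pvKey n m p = k
    · subst hk
      rw [PySem.Dict.getD_insert]
      simp only [beq_self_eq_true, Bool.true_and, if_true, Prod.mk.injEq, beq_iff_eq]
      constructor <;>
        · push_cast
          split <;> omega
    · rw [PySem.Dict.getD_insert, if_neg (fun h => hk h.symm)]
      have : (pvKey n m p == k) = false := by simp [hk]
      simp [this]

-- A's inner fold over the point set = the pair of counts over that list
theorem pv_pts_fold (grid : List String) (pts : List (Int × Int)) :
    ∀ (a b : Int),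
    pts.foldl (fun bw p =>
        let bw1 := if pvCharAt grid p.1 p.2 = 'B' then (bw.1 + 1, bw.2) else bw
        if pvCharAt grid p.1 p.2 = 'W' then (bw1.1, bw1.2 + 1) else bw1) (a, b)
      = (a + (pts.countP (fun p => pvCharAt grid p.1 p.2 == 'B') : Int),
         b + (pts.countP (fun p => pvCharAt grid p.1 p.2 == 'W') : Int)) := by
  induction pts with
  | nil => intro a b; simp
  | cons p pts ih =>
    intro a b
    rw [List.foldl_cons]
    by_cases hB : pvCharAt grid p.1 p.2 = 'B'
    · have hW : ¬ pvCharAt grid p.1 p.2 = 'W' := by rw [hB]; decide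
      simp only [if_pos hB, if_neg hW, ih, List.countP_cons]
      simp [hB]
      ring
    · by_cases hW : pvCharAt grid p.1 p.2 = 'W'
      · simp only [if_neg hB, if_pos hW, ih, List.countP_cons]
        simp [hW]
        ring
      · simp only [if_neg hB, if_neg hW, ih, List.countP_cons]
        simp [hB, hW]

-- the four-point set of a representative (x, y) is, as a set, its whole symmetry class
theorem pv_points_mem (n m x y : Int)
    (hx : 0 ≤ x ∧ x < PySem.Int.floordiv (n + 1) 2)
    (hy : 0 ≤ y ∧ y < PySem.Int.floordiv (m + 1) 2) (p : Int × Int) :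
    p ∈ (PySem.Set.add (PySem.Set.add (PySem.Set.add (PySem.Set.add PySem.Set.empty
          (x, y)) (x, m - 1 - y)) (n - 1 - x, y)) (n - 1 - x, m - 1 - y))
      ↔ p ∈ (pvL n m).filter (fun q => pvKey n m q == (x, y)) := by
  obtain ⟨hx0, hx1⟩ := hx
  obtain ⟨hy0, hy1⟩ := hy
  rw [PySem.Int.floordiv_eq_ediv_of_pos (by norm_num)] at hx1
  rw [PySem.Int.floordiv_eq_ediv_of_pos (by norm_num)] at hy1
  obtain ⟨i, j⟩ := p
  simp only [PySem.Set.mem_add, PySem.Set.empty, List.not_mem_nil, false_or,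
    List.mem_filter, pvL, List.mem_product, PySem.List.mem_pyRange_one, pvKey,
    beq_iff_eq, Prod.mk.injEq]
  split_ifs <;> omega

theorem pv_points_nodup (n m x y : Int) :
    (PySem.Set.add (PySem.Set.add (PySem.Set.add (PySem.Set.add PySem.Set.empty
      (x, y)) (x, m - 1 - y)) (n - 1 - x, y)) (n - 1 - x, m - 1 - y)).Nodup := by
  apply PySem.Set.nodup_add; apply PySem.Set.nodup_add; apply PySem.Set.nodup_add
  apply PySem.Set.nodup_add; exact List.nodup_nil

theorem pv_nodup_L (n m : Int) : (pvL n m).Nodup :=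
  List.Nodup.product (PySem.List.nodup_pyRange_one 0 n) (PySem.List.nodup_pyRange_one 0 m)

-- per representative, A's count equals B's class count
theorem pv_class_count (grid : List String) (n m x y : Int)
    (hx : 0 ≤ x ∧ x < PySem.Int.floordiv (n + 1) 2)
    (hy : 0 ≤ y ∧ y < PySem.Int.floordiv (m + 1) 2) (c : Char) :
    ((PySem.Set.add (PySem.Set.add (PySem.Set.add (PySem.Set.add PySem.Set.empty
        (x, y)) (x, m - 1 - y)) (n - 1 - x, y)) (n - 1 - x, m - 1 - y)).countP
        (fun p => pvCharAt grid p.1 p.2 == c) : Int)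
      = pvCnt grid n m (x, y) c := by
  have hperm : (PySem.Set.add (PySem.Set.add (PySem.Set.add (PySem.Set.add PySem.Set.empty
      (x, y)) (x, m - 1 - y)) (n - 1 - x, y)) (n - 1 - x, m - 1 - y)).Perm
      ((pvL n m).filter (fun q => pvKey n m q == (x, y))) := by
    rw [List.perm_ext_iff_of_nodup (pv_points_nodup n m x y)
      ((pv_nodup_L n m).filter _)]
    exact pv_points_mem n m x y hx hy
  rw [hperm.countP_eq, List.countP_filter, pvCnt]
  congr 1
  apply List.countP_congr
  intro p _
  rw [Bool.and_comm]

-- the set of canonical keys of all cells = the set of representatives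
theorem pv_keys_perm (n m : Int) :
    (PySem.Set.ofList ((pvL n m).map (pvKey n m))).Perm
      ((PySem.List.pyRange 0 (PySem.Int.floordiv (n + 1) 2) 1) ×ˢ
       (PySem.List.pyRange 0 (PySem.Int.floordiv (m + 1) 2) 1)) := by
  rw [List.perm_ext_iff_of_nodup (PySem.Set.nodup_ofList _)
    (List.Nodup.product (PySem.List.nodup_pyRange_one _ _) (PySem.List.nodup_pyRange_one _ _))]
  intro k
  obtain ⟨u, v⟩ := k
  constructor
  · intro h
    rw [PySem.Set.mem_ofList] at h
    obtain ⟨⟨i, j⟩, hmem, hk⟩ := List.mem_map.mp h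
    rw [pvL, List.mem_product, PySem.List.mem_pyRange_one, PySem.List.mem_pyRange_one] at hmem
    simp only [pvKey, Prod.mk.injEq] at hk
    rw [List.mem_product, PySem.List.mem_pyRange_one, PySem.List.mem_pyRange_one,
        PySem.Int.floordiv_eq_ediv_of_pos (by norm_num : (0:Int) < 2),
        PySem.Int.floordiv_eq_ediv_of_pos (by norm_num : (0:Int) < 2)]
    split_ifs at hk <;> omega
  · intro h
    rw [List.mem_product, PySem.List.mem_pyRange_one, PySem.List.mem_pyRange_one,
        PySem.Int.floordiv_eq_ediv_of_pos (by norm_num : (0:Int) < 2),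
        PySem.Int.floordiv_eq_ediv_of_pos (by norm_num : (0:Int) < 2)] at h
    rw [PySem.Set.mem_ofList]
    apply List.mem_map.mpr
    refine ⟨(u, v), ?_, ?_⟩
    · rw [pvL, List.mem_product, PySem.List.mem_pyRange_one, PySem.List.mem_pyRange_one]
      omega
    · simp only [pvKey, Prod.mk.injEq]
      constructor <;> split_ifs <;> omega

theorem pv_B_eq (grid : List String) :
    solution_alt grid
      = ((PySem.Set.ofList ((pvL (pvN grid) (pvM grid)).map (pvKey (pvN grid) (pvM grid)))).map
          (pvF grid (pvN grid) (pvM grid))).sum := by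
  have h1 : (PySem.List.pyRange 0 (pvN grid) 1).foldl (fun d i =>
        (PySem.List.pyRange 0 (pvM grid) 1).foldl
          (fun d j => (fun (d : PySem.Dict (Int × Int) (Int × Int)) (p : Int × Int) =>
        d.insert (pvKey (pvN grid) (pvM grid) p)
          ((d.getD (pvKey (pvN grid) (pvM grid) p) (0, 0)).1 +
              (if pvCharAt grid p.1 p.2 = 'B' then 1 else 0),
           (d.getD (pvKey (pvN grid) (pvM grid) p) (0, 0)).2 +
              (if pvCharAt grid p.1 p.2 = 'W' then 1 else 0))) d (i, j)) d) PySem.Dict.empty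
      = (pvL (pvN grid) (pvM grid)).foldl (fun (d : PySem.Dict (Int × Int) (Int × Int)) (p : Int × Int) =>
        d.insert (pvKey (pvN grid) (pvM grid) p)
          ((d.getD (pvKey (pvN grid) (pvM grid) p) (0, 0)).1 +
              (if pvCharAt grid p.1 p.2 = 'B' then 1 else 0),
           (d.getD (pvKey (pvN grid) (pvM grid) p) (0, 0)).2 +
              (if pvCharAt grid p.1 p.2 = 'W' then 1 else 0))) PySem.Dict.empty :=
    pv_foldl_product _ _ (fun (d : PySem.Dict (Int × Int) (Int × Int)) (p : Int × Int) =>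
        d.insert (pvKey (pvN grid) (pvM grid) p)
          ((d.getD (pvKey (pvN grid) (pvM grid) p) (0, 0)).1 +
              (if pvCharAt grid p.1 p.2 = 'B' then 1 else 0),
           (d.getD (pvKey (pvN grid) (pvM grid) p) (0, 0)).2 +
              (if pvCharAt grid p.1 p.2 = 'W' then 1 else 0))) _
  have hs : solution_alt grid
      = (((PySem.List.pyRange 0 (pvN grid) 1).foldl (fun d i =>
            (PySem.List.pyRange 0 (pvM grid) 1).foldl
              (fun d j => (fun (d : PySem.Dict (Int × Int) (Int × Int)) (p : Int × Int) =>
        d.insert (pvKey (pvN grid) (pvM grid) p)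
          ((d.getD (pvKey (pvN grid) (pvM grid) p) (0, 0)).1 +
              (if pvCharAt grid p.1 p.2 = 'B' then 1 else 0),
           (d.getD (pvKey (pvN grid) (pvM grid) p) (0, 0)).2 +
              (if pvCharAt grid p.1 p.2 = 'W' then 1 else 0))) d (i, j)) d)
            PySem.Dict.empty).values.map (fun bw => min bw.1 bw.2)).sum := rfl
  rw [hs, h1]
  have hnd : ((pvL (pvN grid) (pvM grid)).foldl (fun (d : PySem.Dict (Int × Int) (Int × Int)) (p : Int × Int) =>
        d.insert (pvKey (pvN grid) (pvM grid) p)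
          ((d.getD (pvKey (pvN grid) (pvM grid) p) (0, 0)).1 +
              (if pvCharAt grid p.1 p.2 = 'B' then 1 else 0),
           (d.getD (pvKey (pvN grid) (pvM grid) p) (0, 0)).2 +
              (if pvCharAt grid p.1 p.2 = 'W' then 1 else 0))) PySem.Dict.empty).keys.Nodup :=
    PySem.Dict.nodup_keys_foldl_insert_key (pvL (pvN grid) (pvM grid))
      (pvKey (pvN grid) (pvM grid))
      (fun d p => ((d.getD (pvKey (pvN grid) (pvM grid) p) (0, 0)).1 +
          (if pvCharAt grid p.1 p.2 = 'B' then 1 else 0),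
        (d.getD (pvKey (pvN grid) (pvM grid) p) (0, 0)).2 +
          (if pvCharAt grid p.1 p.2 = 'W' then 1 else 0)))
      PySem.Dict.empty List.nodup_nil
  have hkeys : ((pvL (pvN grid) (pvM grid)).foldl (fun (d : PySem.Dict (Int × Int) (Int × Int)) (p : Int × Int) =>
        d.insert (pvKey (pvN grid) (pvM grid) p)
          ((d.getD (pvKey (pvN grid) (pvM grid) p) (0, 0)).1 +
              (if pvCharAt grid p.1 p.2 = 'B' then 1 else 0),
           (d.getD (pvKey (pvN grid) (pvM grid) p) (0, 0)).2 +
              (if pvCharAt grid p.1 p.2 = 'W' then 1 else 0))) PySem.Dict.empty).keys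
      = PySem.Set.ofList ((pvL (pvN grid) (pvM grid)).map (pvKey (pvN grid) (pvM grid))) :=
    (PySem.Dict.keys_foldl_insert_key (pvL (pvN grid) (pvM grid))
      (pvKey (pvN grid) (pvM grid))
      (fun d p => ((d.getD (pvKey (pvN grid) (pvM grid) p) (0, 0)).1 +
          (if pvCharAt grid p.1 p.2 = 'B' then 1 else 0),
        (d.getD (pvKey (pvN grid) (pvM grid) p) (0, 0)).2 +
          (if pvCharAt grid p.1 p.2 = 'W' then 1 else 0)))
      PySem.Dict.empty).trans (by rfl)
  rw [PySem.Dict.values_eq_map_keys _ hnd (0, 0), hkeys, List.map_map]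
  congr 1
  apply List.map_congr_left
  intro k _
  simp only [Function.comp_apply]
  rw [pv_getD_fold]
  simp only [PySem.Dict.getD_empty, zero_add]
  rfl

theorem pv_A_eq (grid : List String) :
    solution grid
      = (((PySem.List.pyRange 0 (PySem.Int.floordiv (pvN grid + 1) 2) 1) ×ˢ
          (PySem.List.pyRange 0 (PySem.Int.floordiv (pvM grid + 1) 2) 1)).map
          (pvF grid (pvN grid) (pvM grid))).sum := by
  have h0 : solution grid
      = (PySem.List.pyRange 0 (PySem.Int.floordiv (pvN grid + 1) 2) 1).foldl (fun ans x =>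
          (PySem.List.pyRange 0 (PySem.Int.floordiv (pvM grid + 1) 2) 1).foldl (fun ans y =>
            ans + min ((PySem.Set.add (PySem.Set.add (PySem.Set.add (PySem.Set.add PySem.Set.empty
                (x, y)) (x, pvM grid - 1 - y)) (pvN grid - 1 - x, y))
                (pvN grid - 1 - x, pvM grid - 1 - y)).foldl (fun bw p =>
                  let bw1 := if pvCharAt grid p.1 p.2 = 'B' then (bw.1 + 1, bw.2) else bw
                  if pvCharAt grid p.1 p.2 = 'W' then (bw1.1, bw1.2 + 1) else bw1) ((0 : Int), (0 : Int))).1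
              ((PySem.Set.add (PySem.Set.add (PySem.Set.add (PySem.Set.add PySem.Set.empty
                (x, y)) (x, pvM grid - 1 - y)) (pvN grid - 1 - x, y))
                (pvN grid - 1 - x, pvM grid - 1 - y)).foldl (fun bw p =>
                  let bw1 := if pvCharAt grid p.1 p.2 = 'B' then (bw.1 + 1, bw.2) else bw
                  if pvCharAt grid p.1 p.2 = 'W' then (bw1.1, bw1.2 + 1) else bw1) ((0 : Int), (0 : Int))).2)
          ans) 0 := rfl
  rw [h0]
  simp only [pv_pts_fold grid, zero_add, PySem.List.foldl_add]
  rw [pv_sum_product]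
  congr 1
  apply List.map_congr_left
  intro x hx
  congr 1
  apply List.map_congr_left
  intro y hy
  rw [PySem.List.mem_pyRange_one] at hx hy
  rw [pv_class_count grid (pvN grid) (pvM grid) x y hx hy 'B',
      pv_class_count grid (pvN grid) (pvM grid) x y hx hy 'W']
  rfl

theorem pv_eq (grid : List String) : solution grid = solution_alt grid := by
  rw [pv_A_eq, pv_B_eq]
  exact (((pv_keys_perm (pvN grid) (pvM grid)).map (pvF grid (pvN grid) (pvM grid))).sum_eq).symm

-- ===== VERDICT (by name: the statement is the Claim_ definition above) =====
theorem solution_spec : Claim_equal_solution := by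
  intro grid _ _
  unfold Spec_solution
  exact pv_eq grid
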